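-- pv_equiv track=rewrite | github.com/r1cc4rdo/daily_coding_problem | problems/01/solution_01.py | coding_problem_01
-- ===== SOURCE A (Python) =====
-- from collections import deque
--
-- def coding_problem_01(stack):
--     """
--     Given a stack of N elements, interleave the first half of the stack
--     with the second half reversed using one other queue.
--     Example:
--
--     >>> coding_problem_01([1, 2, 3, 4, 5])
--     [1, 5, 2, 4, 3]
--     >>> coding_problem_01([1, 2, 3, 4, 5, 6])
--     [1, 6, 2, 5, 3, 4]
--
--     Note: with itertools, you could instead islice(chain.from_iterable(izip(l, reversed(l))), len(l))
--     """
--     queue = deque([])  # stack S:[1,2,3,4,5], queue Q:[]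
--     for _ in range(len(stack) - 1):  # move stack into queue. S:[1], Q:[5,4,3,2]
--         queue.append(stack.pop())
--     for _ in range(len(queue) // 2):
--         stack.append(queue.popleft())  # S:[1,5], Q:[4,3,2]
--         for __ in range(len(queue) - 1):  # rotate last element to front, S:[1,5], Q:[2,4,3]
--             queue.append(queue.popleft())
--         stack.append(queue.popleft())  # S:[1,5,2], Q:[4,3]
--     if queue:
--         stack.append(queue.popleft())
--     return stack
-- ===== SOURCE B (Python) =====
-- def coding_problem_01(stack):
--     out = []
--     i, j = 0, len(stack) - 1
--     while i < j:
--         out.append(stack[i])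
--         out.append(stack[j])
--         i += 1
--         j -= 1
--     if i == j:
--         out.append(stack[i])
--     stack[:] = out
--     return stack
-- ===== Notes on version B (the rewrite author's own statement) =====
-- stated objective: faster
-- what changed: Replaces the stack/queue simulation with repeated full-queue rotations by a single two-pointer front/back pass building the output directly.
import Mathlib
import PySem

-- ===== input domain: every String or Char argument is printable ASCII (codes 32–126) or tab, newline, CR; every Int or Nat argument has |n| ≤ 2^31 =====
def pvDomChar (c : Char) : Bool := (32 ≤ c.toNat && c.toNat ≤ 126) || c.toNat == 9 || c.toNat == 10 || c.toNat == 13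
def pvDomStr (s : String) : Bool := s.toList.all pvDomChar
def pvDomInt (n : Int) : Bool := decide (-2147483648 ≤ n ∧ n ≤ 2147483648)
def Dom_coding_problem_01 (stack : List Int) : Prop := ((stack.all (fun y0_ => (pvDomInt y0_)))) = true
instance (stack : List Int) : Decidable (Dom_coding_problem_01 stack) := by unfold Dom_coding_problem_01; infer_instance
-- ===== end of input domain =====

-- B replaces A's stack/queue simulation (which rotates the whole queue once per output pair)
-- by a single two-pointer front/back pass; the equivalence proved is about the RETURN value
-- (both Pythons also mutate `stack` in place, and leave it equal to the returned list).

-- ===== PORT A =====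
-- queue.popleft(): (front element or 0, rest); A's loops only pop nonempty queues.
def pvPopLeft (q : List Int) : Int × List Int :=
  match q with
  | [] => (0, [])
  | x :: t => (x, t)

-- inner loop `for __ in range(len(queue) - 1): queue.append(queue.popleft())`
def pvRotLoop : Nat → List Int → List Int
  | 0, q => q
  | n+1, q =>
    let (x, t) := pvPopLeft q
    pvRotLoop n (t ++ [x])

-- first loop `for _ in range(len(stack) - 1): queue.append(stack.pop())`
def pvPhase1 : Nat → List Int × List Int → List Int × List Int
  | 0, sq => sq
  | n+1, (s, q) => pvPhase1 n (s.dropLast, q ++ [s.getLastD 0])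

-- second loop `for _ in range(len(queue) // 2): ...`
def pvPhase2 : Nat → List Int × List Int → List Int × List Int
  | 0, sq => sq
  | n+1, (s, q) =>
    let (x, q1) := pvPopLeft q
    let s1 := s ++ [x]
    let q2 := pvRotLoop (q1.length - 1) q1
    let (y, q3) := pvPopLeft q2
    pvPhase2 n (s1 ++ [y], q3)

def coding_problem_01 (stack : List Int) : List Int :=
  let sq1 := pvPhase1 (stack.length - 1) (stack, [])
  let sq2 := pvPhase2 (sq1.2.length / 2) sq1
  match sq2.2 with
  | [] => sq2.1
  | x :: _ => sq2.1 ++ [x]    -- `if queue: stack.append(queue.popleft())`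

-- ===== PORT B =====
-- `while i < j: out.append(stack[i]); out.append(stack[j]); i += 1; j -= 1`, then `if i == j`;
-- the loop keeps 0 ≤ i ≤ j < len(stack), so stack[i]/stack[j] is ported as getD.
def pvBLoop (stack : List Int) (i j : Int) (out : List Int) : List Int :=
  if i < j then
    pvBLoop stack (i + 1) (j - 1) (out ++ [stack.getD i.toNat 0, stack.getD j.toNat 0])
  else if i = j then out ++ [stack.getD i.toNat 0]
  else out
termination_by (j - i).toNat
decreasing_by omega

def coding_problem_01_alt (stack : List Int) : List Int :=
  pvBLoop stack 0 ((stack.length : Int) - 1) []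

-- ===== PRECONDITION & SPEC =====
def Spec_coding_problem_01 (stack : List Int) (out : List Int) : Prop := out = coding_problem_01_alt stack
instance (stack : List Int) (out : List Int) : Decidable (Spec_coding_problem_01 stack out) := by unfold Spec_coding_problem_01; infer_instance

-- ===== CLAIM (what is proved, stated in full; the proofs are below) =====
def Claim_equal_coding_problem_01 : Prop := ∀ (stack : List Int), Dom_coding_problem_01 stack → Spec_coding_problem_01 stack (coding_problem_01 stack)

-- ===== LEMMAS AND PROOFS =====

-- pvMix is the common characterisation of both ports: take the front element, then the back
-- element, and recurse on what is left in between.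
def pvMix : List Int → List Int
  | [] => []
  | x :: xs =>
    if xs = [] then [x] else x :: xs.getLastD 0 :: pvMix xs.dropLast
termination_by l => l.length
decreasing_by simp

theorem pvMix_nil : pvMix [] = [] := by rw [pvMix.eq_def]
theorem pvMix_single (x : Int) : pvMix [x] = [x] := by rw [pvMix.eq_def]; simp
theorem pvMix_cons (x : Int) (xs : List Int) (h : xs ≠ []) :
    pvMix (x :: xs) = x :: xs.getLastD 0 :: pvMix xs.dropLast := by
  rw [pvMix.eq_def]; simp [h]

theorem split_last (t : List Int) (h : t ≠ []) : t = t.dropLast ++ [t.getLastD 0] := by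
  cases t with
  | nil => simp at h
  | cons a u => simpa [List.getLastD_eq_getLast?] using (List.dropLast_append_getLast (l := a :: u) (by simp)).symm

theorem rev_eq (t : List Int) (h : t ≠ []) : t.reverse = t.getLastD 0 :: t.dropLast.reverse := by
  conv_lhs => rw [split_last t h]
  simp

theorem pvMix_cons_reverse_fuel (n : Nat) : ∀ (xs : List Int), xs.length ≤ n → ∀ x,
    pvMix (x :: xs.reverse) = x :: pvMix xs := by
  induction n with
  | zero =>
    intro xs h x
    have : xs = [] := by cases xs <;> simp_all
    subst this; simp [pvMix_nil, pvMix_single]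
  | succ n ih =>
    intro xs h x
    match xs with
    | [] => simp [pvMix_nil, pvMix_single]
    | a :: t =>
      have hLHS : pvMix (x :: (a :: t).reverse) = x :: a :: pvMix t.reverse := by
        rw [pvMix_cons x _ (by simp)]
        have h1 : ((a :: t).reverse).getLastD 0 = a := by simp [List.getLastD_eq_getLast?]
        have h2 : ((a :: t).reverse).dropLast = t.reverse := by
          rw [show (a :: t).reverse = t.reverse ++ [a] by simp, List.dropLast_concat]
        rw [h1, h2]
      rw [hLHS]
      cases ht : t with
      | nil => simp [pvMix_nil, pvMix_single]
      | cons b u =>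
        rw [← ht]
        have htne : t ≠ [] := by rw [ht]; simp
        rw [rev_eq t htne]
        have hdl : t.dropLast.length ≤ n := by
          rw [ht] at h ⊢; simp at h ⊢; omega
        rw [ih t.dropLast hdl (t.getLastD 0)]
        rw [pvMix_cons a t htne]

theorem pvMix_cons_reverse (xs : List Int) (x : Int) :
    pvMix (x :: xs.reverse) = x :: pvMix xs :=
  pvMix_cons_reverse_fuel xs.length xs le_rfl x

theorem pvRotLoop_rot (xs ys : List Int) :
    pvRotLoop xs.length (xs ++ ys) = ys ++ xs := by
  induction xs generalizing ys with
  | nil => simp [pvRotLoop]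
  | cons x t ih =>
    simp only [List.length_cons, pvRotLoop, List.cons_append, pvPopLeft]
    rw [List.append_assoc, ih (ys ++ [x])]
    simp

theorem pvRotLoop_last (q : List Int) (h : q ≠ []) :
    pvRotLoop (q.length - 1) q = q.getLastD 0 :: q.dropLast := by
  have hlen : q.length - 1 = q.dropLast.length := by simp [List.length_dropLast]
  have h2 := pvRotLoop_rot q.dropLast [q.getLastD 0]
  rw [← split_last q h] at h2
  rw [hlen, h2]
  simp

theorem pvPhase1_spec (t : List Int) (h : Int) (q : List Int) :
    pvPhase1 t.length (h :: t, q) = ([h], q ++ t.reverse) := by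
  induction hn : t.length generalizing t q with
  | zero =>
    have : t = [] := List.length_eq_zero_iff.mp hn
    subst this; simp [pvPhase1]
  | succ n ih =>
    have ht : t ≠ [] := by intro e; subst e; simp at hn
    have hdl : (h :: t).dropLast = h :: t.dropLast := by
      cases t with
      | nil => simp at ht
      | cons a u => simp
    have hgl : (h :: t).getLastD 0 = t.getLastD 0 := by
      cases t with
      | nil => simp at ht
      | cons a u => simp [List.getLastD_eq_getLast?]
    have hlen : t.dropLast.length = n := by simp [List.length_dropLast]; omega
    simp only [pvPhase1, hdl, hgl]
    rw [ih t.dropLast (q ++ [t.getLastD 0]) hlen]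
    rw [rev_eq t ht]
    simp

def pvFinish (sq : List Int × List Int) : List Int :=
  match sq.2 with
  | [] => sq.1
  | x :: _ => sq.1 ++ [x]

theorem pvPhase2_spec_fuel (n : Nat) : ∀ (q s : List Int), q.length ≤ n →
    pvFinish (pvPhase2 (q.length / 2) (s, q)) = s ++ pvMix q := by
  induction n with
  | zero =>
    intro q s h
    have : q = [] := by cases q <;> simp_all
    subst this; simp [pvPhase2, pvFinish, pvMix_nil]
  | succ n ih =>
    intro q s h
    match q with
    | [] => simp [pvPhase2, pvFinish, pvMix_nil]
    | [a] => simp [pvPhase2, pvFinish, pvMix_single]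
    | a :: b :: xs =>
      have hne : (b :: xs) ≠ [] := by simp
      have hlen2 : (a :: b :: xs).length / 2 = (b :: xs).dropLast.length / 2 + 1 := by
        simp; omega
      rw [hlen2]
      simp only [pvPhase2, pvPopLeft]
      rw [pvRotLoop_last (b :: xs) hne]
      have hle : (b :: xs).dropLast.length ≤ n := by simp at h ⊢; omega
      rw [ih (b :: xs).dropLast ((s ++ [a]) ++ [(b :: xs).getLastD 0]) hle]
      rw [pvMix_cons a (b :: xs) hne]
      simp

theorem pvBLoop_spec_fuel (n : Nat) : ∀ (seg pre post out : List Int), seg.length ≤ n →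
    pvBLoop (pre ++ seg ++ post) (pre.length : Int)
      ((pre.length : Int) + (seg.length : Int) - 1) out = out ++ pvMix seg := by
  induction n with
  | zero =>
    intro seg pre post out h
    have : seg = [] := by cases seg <;> simp_all
    subst this
    rw [pvBLoop]
    rw [if_neg (by simp), if_neg (by omega)]
    simp [pvMix_nil]
  | succ n ih =>
    intro seg pre post out h
    match seg with
    | [] =>
      rw [pvBLoop]
      rw [if_neg (by simp), if_neg (by simp; omega)]
      simp [pvMix_nil]
    | [a] =>
      rw [pvBLoop]
      rw [if_neg (by simp), if_pos (by simp)]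
      have : ((pre.length : Int)).toNat = pre.length := by omega
      rw [this]
      have hget : (pre ++ [a] ++ post).getD pre.length 0 = a := by
        rw [List.append_assoc, List.getD_append_right _ _ _ _ (by omega)]
        simp
      rw [hget, pvMix_single]
    | a :: b :: t =>
      rw [pvBLoop]
      rw [if_pos (by simp; omega)]
      have hi : ((pre.length : Int)).toNat = pre.length := by omega
      have hj : ((pre.length : Int) + ((a :: b :: t).length : Int) - 1).toNat
          = pre.length + (b :: t).length := by simp; omega
      rw [hi, hj]
      have hgi : (pre ++ (a :: b :: t) ++ post).getD pre.length 0 = a := by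
        rw [List.append_assoc, List.getD_append_right _ _ _ _ (by omega)]
        simp
      have hsplit2 := split_last (b :: t) (by simp)
      have hgj : (pre ++ (a :: b :: t) ++ post).getD (pre.length + (b :: t).length) 0
          = (b :: t).getLastD 0 := by
        rw [List.append_assoc, List.getD_append_right _ _ _ _ (by omega)]
        have h1 : pre.length + (b :: t).length - pre.length = t.length + 1 := by
          simp
        rw [h1, show ((a :: b :: t) ++ post) = a :: ((b :: t) ++ post) by simp,
          List.getD_cons_succ, List.getD_append _ _ _ _ (by simp)]
        conv_lhs => rw [hsplit2]
        rw [List.getD_append_right _ _ _ _ (by simp)]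
        simp
      rw [hgi, hgj]
      -- restructure the list for the IH
      have hre : pre ++ (a :: b :: t) ++ post
          = (pre ++ [a]) ++ (b :: t).dropLast ++ ([(b :: t).getLastD 0] ++ post) := by
        conv_lhs => rw [show (a :: b :: t) = [a] ++ (b :: t) by simp, hsplit2]
        simp
      have hidx1 : (pre.length : Int) + 1 = (((pre ++ [a]).length : Int)) := by simp
      have hidx2 : (pre.length : Int) + ((a :: b :: t).length : Int) - 1 - 1
          = ((pre ++ [a]).length : Int) + (((b :: t).dropLast).length : Int) - 1 := by
        simp; omega
      rw [hre, hidx1, hidx2]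
      rw [ih ((b :: t).dropLast) (pre ++ [a]) ([(b :: t).getLastD 0] ++ post)
          (out ++ [a, (b :: t).getLastD 0]) (by simp at h ⊢; omega)]
      rw [pvMix_cons a (b :: t) (by simp)]
      simp

theorem pvBLoop_top (s : List Int) :
    pvBLoop s 0 ((s.length : Int) - 1) [] = pvMix s := by
  have := pvBLoop_spec_fuel s.length s [] [] [] le_rfl
  simpa using this

theorem coding_problem_01_eq_mix (s : List Int) : coding_problem_01 s = pvMix s := by
  cases s with
  | nil => simp [coding_problem_01, pvPhase1, pvPhase2, pvMix_nil]
  | cons h t =>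
    have h1 : (h :: t).length - 1 = t.length := by simp
    have hgoal : coding_problem_01 (h :: t)
        = pvFinish (pvPhase2 (t.reverse.length / 2) ([h], t.reverse)) := by
      simp only [coding_problem_01, h1, pvPhase1_spec t h [], List.nil_append]
      rfl
    have h3 : pvMix (h :: t) = h :: pvMix t.reverse := by
      simpa using pvMix_cons_reverse t.reverse h
    rw [hgoal, pvPhase2_spec_fuel t.reverse.length t.reverse [h] le_rfl, h3]
    simp

theorem coding_problem_01_alt_eq_mix (s : List Int) : coding_problem_01_alt s = pvMix s := by
  simpa [coding_problem_01_alt] using pvBLoop_top s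

-- ===== VERDICT (by name: the statement is the Claim_ definition above) =====
theorem coding_problem_01_spec : Claim_equal_coding_problem_01 := by
  intro s _
  unfold Spec_coding_problem_01
  rw [coding_problem_01_eq_mix, coding_problem_01_alt_eq_mix]
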